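-- pv_equiv track=rewrite | github.com/Yoonyesol/CodingTest | [프로그래머스] 코딩테스트 입문_피자 나눠 먹기2.py | solution
-- ===== SOURCE A (Python) =====
-- def solution(n):
--     result = n
--     i = 2
--     while True:
--         if result % 6 == 0:
--             break
--         result = n * i
--         i+=1
--     return result // 6
-- ===== SOURCE B (Python) =====
-- import math
--
-- def solution(n):
--     return n // math.gcd(n, 6)
-- ===== Notes on version B (the rewrite author's own statement) =====
-- stated objective: simpler
-- what changed: Replaces the while-loop search over multiples of n with the closed form n // gcd(n, 6), since the first multiple of n divisible by 6 is lcm(n,6) = 6*n/gcd(n,6).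
import Mathlib
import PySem

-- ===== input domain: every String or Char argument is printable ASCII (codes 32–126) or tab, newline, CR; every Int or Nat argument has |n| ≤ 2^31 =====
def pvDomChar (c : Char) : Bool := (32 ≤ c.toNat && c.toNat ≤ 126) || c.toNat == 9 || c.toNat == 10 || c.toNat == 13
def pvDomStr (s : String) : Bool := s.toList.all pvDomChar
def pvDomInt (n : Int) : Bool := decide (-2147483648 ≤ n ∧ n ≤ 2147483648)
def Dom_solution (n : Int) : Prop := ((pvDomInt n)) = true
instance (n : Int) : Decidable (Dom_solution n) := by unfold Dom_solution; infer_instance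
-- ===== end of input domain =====

-- B replaces A's while-loop search over multiples of n by the closed form n // gcd(n, 6) (simpler).

-- ===== PORT A =====
-- A's `while True` loop runs at most 6 iterations (result = n*6 is always divisible by 6),
-- so fuel 7 makes the transcription total without changing what it computes.
def solutionLoop (n : Int) (result : Int) (i : Int) : Nat → Int
  | 0 => PySem.Int.floordiv result 6
  | fuel + 1 =>
    if PySem.Int.mod result 6 = 0 then PySem.Int.floordiv result 6
    else solutionLoop n (n * i) (i + 1) fuel

def solution (n : Int) : Int := solutionLoop n n 2 7

-- ===== PORT B =====
def solution_alt (n : Int) : Int := PySem.Int.floordiv n (Int.gcd n 6)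

-- ===== PRECONDITION & SPEC =====
def Spec_solution (n : Int) (out : Int) : Prop := out = solution_alt n
instance (n : Int) (out : Int) : Decidable (Spec_solution n out) := by unfold Spec_solution; infer_instance

-- ===== CLAIM (what is proved, stated in full; the proofs are below) =====
def Claim_equal_solution : Prop := ∀ (n : Int), Dom_solution n → Spec_solution n (solution n)

-- ===== LEMMAS AND PROOFS =====
theorem solution_eq_alt (n : Int) : solution n = solution_alt n := by
  have hg : Int.gcd n 6 = Nat.gcd (n.natAbs % 6) 6 := by
    have : Int.gcd n 6 = Nat.gcd n.natAbs 6 := by rw [Int.gcd]; norm_num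
    rw [this, Nat.gcd_comm, Nat.gcd_rec]
  have hmod : ∀ a : Int, PySem.Int.mod a 6 = a % 6 :=
    fun a => PySem.Int.mod_eq_emod_of_pos (by norm_num)
  have hdiv : ∀ a b : Int, 0 < b → PySem.Int.floordiv a b = a / b :=
    fun a b h => PySem.Int.floordiv_eq_ediv_of_pos h
  have h6 : n % 6 = 0 ∨ n % 6 = 1 ∨ n % 6 = 2 ∨ n % 6 = 3 ∨ n % 6 = 4 ∨ n % 6 = 5 := by omega
  rcases h6 with h | h | h | h | h | h <;>
  · have ha : n.natAbs % 6 = (n % 6).natAbs ∨ (n % 6 ≠ 0 ∧ n.natAbs % 6 = 6 - (n % 6).natAbs) := by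
      omega
    rw [h] at ha
    simp only [solution, solutionLoop, solution_alt, hmod, hg]
    rcases ha with ha | ⟨-, ha⟩ <;>
    · rw [ha]
      norm_num [hdiv _ _ (by norm_num : (0:Int) < 6)]
      split_ifs <;> omega

-- ===== VERDICT (by name: the statement is the Claim_ definition above) =====
theorem solution_spec : Claim_equal_solution := by
  intro n _
  unfold Spec_solution
  exact solution_eq_alt n
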